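-- pv_equiv track=rewrite | github.com/lamalgopach/codeforces | Code_Jam/2020/Vestigium.py | count_rows_and_columns
-- ===== SOURCE A (Python) =====
-- def count_rows_and_columns(matrix, n):
-- 	rows = 0
-- 	cols = 0
-- 	for i, lst in enumerate(matrix):
-- 		lst_set = set(lst)
-- 		if len(lst_set) < len(lst):
-- 			rows += 1
-- 		col_set = set()
-- 		for j in range(n):
-- 			if matrix[j][i] in col_set:
-- 				cols += 1
-- 				break
-- 			col_set.add(matrix[j][i])
--
-- 	return rows, cols
-- ===== SOURCE B (Python) =====
-- def count_rows_and_columns(matrix, n):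
--     # sort-then-adjacent-scan duplicate detection instead of hash sets
--     def has_dup(seq):
--         s = sorted(seq)
--         return any(a == b for a, b in zip(s, s[1:]))
--     rows = sum(map(has_dup, matrix))
--     top = matrix[:n] if n > 0 else []
--     cols = sum(has_dup([row[i] for row in top]) for i in range(len(top)))
--     return rows, cols
-- ===== Notes on version B (the rewrite author's own statement) =====
-- stated objective: alternative
-- what changed: Duplicate detection is done by sorting each sequence and scanning adjacent pairs for equality (sort-then-adjacent-scan) instead of A's hash-set membership tracking, and columns are materialized as lists from the first n rows and scanned uniformly instead of A's index-based early-break per-column loop.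
-- outside the precondition, e.g. on count_rows_and_columns([[5, 5, 7], [1, 2, 7], [9]], 2): A returns (1, 1), B returns (1, 0)
import Mathlib
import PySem

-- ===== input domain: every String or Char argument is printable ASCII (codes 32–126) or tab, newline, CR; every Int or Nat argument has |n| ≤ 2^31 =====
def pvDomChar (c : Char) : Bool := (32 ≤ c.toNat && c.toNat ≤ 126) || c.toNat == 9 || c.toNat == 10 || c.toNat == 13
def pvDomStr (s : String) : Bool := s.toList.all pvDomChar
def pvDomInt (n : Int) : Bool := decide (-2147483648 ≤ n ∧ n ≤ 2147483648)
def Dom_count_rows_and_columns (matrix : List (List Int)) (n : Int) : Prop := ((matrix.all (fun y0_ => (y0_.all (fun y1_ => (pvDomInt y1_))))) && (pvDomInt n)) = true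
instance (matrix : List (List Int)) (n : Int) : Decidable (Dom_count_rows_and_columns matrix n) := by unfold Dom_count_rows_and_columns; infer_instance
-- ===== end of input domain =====

-- B detects duplicates by sorting each sequence and scanning adjacent pairs (instead of A's
-- hash-set tracking) and scans materialized column lists uniformly (objective: alternative).

-- ===== PORT A =====
-- inner loop 'for j in range(n): if matrix[j][i] in col_set: … break; col_set.add(…)'
-- (pyGetD is exact here: Pre_ keeps every index in range)
def pvAColLoop (matrix : List (List Int)) (i : Int) : List Int → PySem.Set Int → Bool
  | [], _ => false
  | j :: js, colSet =>
    let v := PySem.List.pyGetD (PySem.List.pyGetD matrix j []) i 0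
    if PySem.Set.contains colSet v then true
    else pvAColLoop matrix i js (PySem.Set.add colSet v)

def count_rows_and_columns (matrix : List (List Int)) (n : Int) : Int × Int :=
  (PySem.List.enumerate matrix 0).foldl (fun (rc : Int × Int) p =>
    ((if PySem.Set.len (PySem.Set.ofList p.2) < PySem.List.len p.2 then rc.1 + 1 else rc.1),
     (if pvAColLoop matrix p.1 (PySem.List.pyRange 0 n 1) PySem.Set.empty then rc.2 + 1 else rc.2)))
    (0, 0)

-- ===== PORT B =====
-- has_dup: sort, then any adjacent pair equal (zip(s, s[1:]))
def pvHasDupB (l : List Int) : Bool :=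
  ((PySem.List.sorted l (fun x => x) false).zip
    (PySem.List.slice (PySem.List.sorted l (fun x => x) false) (some 1) none)).any
    (fun p => p.1 == p.2)

def count_rows_and_columns_alt (matrix : List (List Int)) (n : Int) : Int × Int :=
  let top := if 0 < n then PySem.List.slice matrix none (some n) else []
  (((matrix.countP pvHasDupB : Nat) : Int),
   (((List.range top.length).countP (fun i => pvHasDupB (top.map (fun r => r.getD i 0))) : Nat) : Int))

-- ===== PRECONDITION & SPEC =====
-- Pre_ covers the empty matrix, every nonpositive n (A's column loop never runs) and the function's
-- contract, n = len(matrix) with every row at least that long (the n×n grid, possibly with extra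
-- trailing entries per row): on other mismatched/ragged inputs A either raises IndexError or scans
-- only a truncated prefix of each column while indexing len(matrix) columns, an artefact of its
-- index loop that a transposition-based pass has no reason to reproduce.
def Pre_count_rows_and_columns (matrix : List (List Int)) (n : Int) : Prop :=
  matrix = [] ∨ n ≤ 0 ∨ (n = (matrix.length : Int) ∧ ∀ row ∈ matrix, matrix.length ≤ row.length)
instance (matrix : List (List Int)) (n : Int) : Decidable (Pre_count_rows_and_columns matrix n) := by unfold Pre_count_rows_and_columns; infer_instance

def pvWitness_count_rows_and_columns : List (List Int) × Int := ([[1, 1], [2, 3]], 2)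

def Spec_count_rows_and_columns (matrix : List (List Int)) (n : Int) (out : Int × Int) : Prop := out = count_rows_and_columns_alt matrix n
instance (matrix : List (List Int)) (n : Int) (out : Int × Int) : Decidable (Spec_count_rows_and_columns matrix n out) := by unfold Spec_count_rows_and_columns; infer_instance

-- ===== CLAIM (what is proved, stated in full; the proofs are below) =====
def Claim_equal_count_rows_and_columns : Prop := ∀ (matrix : List (List Int)) (n : Int), Dom_count_rows_and_columns matrix n → Pre_count_rows_and_columns matrix n → Spec_count_rows_and_columns matrix n (count_rows_and_columns matrix n)

-- ===== LEMMAS AND PROOFS =====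

-- set(l) is smaller than l exactly when l has a duplicate
theorem pv_ofList_lt_iff (l : List Int) :
    PySem.Set.len (PySem.Set.ofList l) < PySem.List.len l ↔ ¬ l.Nodup := by
  have h1 : (PySem.Set.ofList l).toFinset = l.toFinset := by
    ext x; simp [PySem.Set.mem_ofList]
  have h2 : (PySem.Set.ofList l).length = l.toFinset.card := by
    rw [← List.toFinset_card_of_nodup (PySem.Set.nodup_ofList l), h1]
  have h3 : l.toFinset.card = l.length ↔ l.Nodup := Multiset.toFinset_card_eq_card_iff_nodup
  have h4 := List.toFinset_card_le l
  simp only [PySem.Set.len, PySem.List.len_eq, h2]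
  constructor
  · intro h hnd
    rw [h3.mpr hnd] at h
    omega
  · intro hnd
    have hne : l.toFinset.card ≠ l.length := fun he => hnd (h3.mp he)
    omega

-- on a ≤-sorted list, some adjacent pair is equal iff the list has a duplicate
theorem pv_adj_any (s : List Int) (h : s.Pairwise (· ≤ ·)) :
    ((s.zip s.tail).any (fun p => p.1 == p.2)) = decide (¬ s.Nodup) := by
  induction s with
  | nil => simp
  | cons a t ih =>
    cases t with
    | nil => simp
    | cons b t' =>
      have hab : a ≤ b := (List.pairwise_cons.mp h).1 b (List.mem_cons_self)
      have hat : ∀ x ∈ t', a ≤ x := fun x hx =>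
        (List.pairwise_cons.mp h).1 x (List.mem_cons_of_mem b hx)
      have hbt : (b :: t').Pairwise (· ≤ ·) := (List.pairwise_cons.mp h).2
      by_cases he : a = b
      · subst he
        have : ¬ (a :: a :: t').Nodup := by simp
        simp [this]
      · have hlt : a < b := lt_of_le_of_ne hab he
        have hrec := ih hbt
        have hmem : a ∉ b :: t' := by
          intro hm
          rcases List.mem_cons.mp hm with rfl | hm'
          · exact he rfl
          · exact absurd ((List.pairwise_cons.mp hbt).1 a hm') (by omega)
        have hnd : (a :: b :: t').Nodup ↔ (b :: t').Nodup := by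
          simp [List.nodup_cons, hmem]
        simp only [List.zip_cons_cons, List.tail_cons, List.any_cons] at hrec ⊢
        rw [show ((a == b) = false) from by simp [he], Bool.false_or, hrec]
        by_cases hn : (b :: t').Nodup <;> simp [hn, hnd]

theorem pvHasDupB_spec (l : List Int) : pvHasDupB l = decide (¬ l.Nodup) := by
  unfold pvHasDupB
  have hs : PySem.List.slice (PySem.List.sorted l (fun x => x) false) (some 1) none
      = (PySem.List.sorted l (fun x => x) false).tail := by
    have := PySem.List.slice_from_natCast (PySem.List.sorted l (fun x => x) false) 1
    simpa [List.drop_one] using this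
  rw [hs, pv_adj_any _ (by simpa using PySem.List.sorted_pairwise l (fun x => x))]
  apply decide_eq_decide.mpr
  apply not_congr
  exact (PySem.List.sorted_perm l (fun x => x) false).nodup_iff

-- fold over enumerate(xs) of a body reading only the element / only the index
theorem pv_foldl_enum_snd {β : Type} (f : β → List Int → β) (l : List (List Int)) (a : β) (s : Int) :
    List.foldl (fun r (p : Int × List Int) => f r p.2) a (PySem.List.enumerate l s)
      = List.foldl f a l := by
  conv_rhs => rw [← PySem.List.map_snd_enumerate l s]
  rw [List.foldl_map]

theorem pv_foldl_enum_fst {β : Type} (g : β → Int → β) (l : List (List Int)) (a : β) (s : Int) :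
    List.foldl (fun c (p : Int × List Int) => g c p.1) a (PySem.List.enumerate l s)
      = List.foldl g a (PySem.List.pyRange s (s + l.length) 1) := by
  conv_rhs => rw [← PySem.List.map_fst_enumerate l s]
  rw [List.foldl_map]

-- A's early-break scan, abstracted to the list of values it fetches
def pvScan : List Int → PySem.Set Int → Bool
  | [], _ => false
  | v :: vs, s => if PySem.Set.contains s v then true else pvScan vs (PySem.Set.add s v)

theorem pvAColLoop_eq_scan (matrix : List (List Int)) (i : Int) (js : List Int) (s : PySem.Set Int) :
    pvAColLoop matrix i js s
      = pvScan (js.map (fun j => PySem.List.pyGetD (PySem.List.pyGetD matrix j []) i 0)) s := by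
  induction js generalizing s with
  | nil => rfl
  | cons j js ih => simp [pvAColLoop, pvScan, ih]

theorem pvScan_spec (l : List Int) (s : PySem.Set Int) :
    pvScan l s = decide (¬ (l.Nodup ∧ ∀ x ∈ l, x ∉ s)) := by
  induction l generalizing s with
  | nil => simp [pvScan]
  | cons v vs ih =>
    by_cases hv : v ∈ s
    · have hns : ¬ ((v :: vs).Nodup ∧ ∀ x ∈ v :: vs, x ∉ s) :=
        fun h => h.2 v (List.mem_cons_self) hv
      rw [pvScan, if_pos ((PySem.Set.contains_iff s v).mpr hv)]
      exact (decide_eq_true hns).symm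
    · have hc : PySem.Set.contains s v = false := by
        cases hcc : PySem.Set.contains s v with
        | false => rfl
        | true => exact absurd ((PySem.Set.contains_iff s v).mp hcc) hv
      rw [pvScan, hc, if_neg (by simp), ih]
      apply decide_eq_decide.mpr
      apply not_congr
      constructor
      · rintro ⟨hnd, hall⟩
        refine ⟨List.nodup_cons.mpr ⟨fun hvvs => ?_, hnd⟩, fun x hx => ?_⟩
        · exact hall v hvvs ((PySem.Set.mem_add s v v).mpr (Or.inr rfl))
        · rcases List.mem_cons.mp hx with rfl | hxvs
          · exact hv
          · exact fun hxs => hall x hxvs ((PySem.Set.mem_add s v x).mpr (Or.inl hxs))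
      · rintro ⟨hndc, hallc⟩
        obtain ⟨hvnot, hnd⟩ := List.nodup_cons.mp hndc
        refine ⟨hnd, fun x hx hxa => ?_⟩
        rcases (PySem.Set.mem_add s v x).mp hxa with hxs | rfl
        · exact hallc x (List.mem_cons_of_mem v hx) hxs
        · exact hvnot hx

-- pvScan from the empty set is exactly B's duplicate test
theorem pvScan_empty (l : List Int) : pvScan l PySem.Set.empty = pvHasDupB l := by
  rw [pvScan_spec, pvHasDupB_spec]
  apply decide_eq_decide.mpr
  apply not_congr
  simp

-- ===== VERDICT (by name: the statement is the Claim_ definition above) =====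
theorem count_rows_and_columns_spec : Claim_equal_count_rows_and_columns := by
  intro matrix n _ hpre
  unfold Spec_count_rows_and_columns count_rows_and_columns count_rows_and_columns_alt
  rw [PySem.List.foldl_prod_mk
        (fun r (p : Int × List Int) =>
          if PySem.Set.len (PySem.Set.ofList p.2) < PySem.List.len p.2 then r + 1 else r)
        (fun c (p : Int × List Int) =>
          if pvAColLoop matrix p.1 (PySem.List.pyRange 0 n 1) PySem.Set.empty then c + 1 else c)]
  simp only [Prod.mk.injEq]
  refine ⟨?_, ?_⟩
  · -- rows
    rw [pv_foldl_enum_snd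
        (fun r lst => if PySem.Set.len (PySem.Set.ofList lst) < PySem.List.len lst then r + 1 else r)]
    have : ∀ (l : List (List Int)) (a : Int),
        l.foldl (fun r lst => if PySem.Set.len (PySem.Set.ofList lst) < PySem.List.len lst then r + 1 else r) a
          = a + (l.countP pvHasDupB : Int) := by
      intro l a
      rw [← PySem.List.foldl_count_if pvHasDupB l a]
      apply PySem.List.foldl_congr_mem
      intro acc x _
      rw [pvHasDupB_spec]
      by_cases h : x.Nodup
      · rw [if_neg (by rw [pv_ofList_lt_iff]; exact not_not_intro h)]
        simp [h]
      · rw [if_pos ((pv_ofList_lt_iff x).mpr h)]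
        simp [h]
    simpa using this matrix 0
  · -- cols
    rw [pv_foldl_enum_fst
        (fun c i => if pvAColLoop matrix i (PySem.List.pyRange 0 n 1) PySem.Set.empty then c + 1 else c)]
    by_cases hmat : matrix = []
    · subst hmat
      simp only [List.length_nil, Nat.cast_zero, add_zero]
      rw [PySem.List.pyRange_one_eq_nil le_rfl]
      have htop : (if 0 < n then PySem.List.slice ([] : List (List Int)) none (some n) else []) = [] := by
        split
        · rw [PySem.List.slice_to ([] : List (List Int)) (by omega)]
          simp
        · rfl
      simp [htop]
    · by_cases hn0 : n ≤ 0
      · -- A's column loop never runs; B's "first n rows" is empty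
        have hA : PySem.List.pyRange 0 n 1 = [] := PySem.List.pyRange_one_eq_nil hn0
        have hz : ∀ (l : List Int) (a : Int),
            l.foldl (fun c i =>
              if pvAColLoop matrix i (PySem.List.pyRange 0 n 1) PySem.Set.empty then c + 1 else c) a = a := by
          intro l a
          induction l generalizing a with
          | nil => rfl
          | cons x xs ih =>
            rw [hA] at ih ⊢
            simp [pvAColLoop]
        rw [hz]
        have htop : (if 0 < n then PySem.List.slice matrix none (some n) else []) = [] := by
          rw [if_neg (by omega)]
        rw [htop]
        simp
      · -- the square case: n = len(matrix) > 0, every row of length n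
        obtain ⟨hn, hsq⟩ : n = (matrix.length : Int) ∧ ∀ row ∈ matrix, matrix.length ≤ row.length := by
          rcases hpre with h | h | h
          · exact absurd h hmat
          · exact absurd h hn0
          · exact h
        have hcol : ∀ k : Nat, k < matrix.length →
            pvAColLoop matrix (k : Int) (PySem.List.pyRange 0 n 1) PySem.Set.empty
              = pvHasDupB (matrix.map (fun r => r.getD k 0)) := by
          intro k hk
          rw [pvAColLoop_eq_scan]
          have hmap : (PySem.List.pyRange 0 n 1).map
                (fun j => PySem.List.pyGetD (PySem.List.pyGetD matrix j []) (k : Int) 0)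
              = matrix.map (fun r => PySem.List.pyGetD r (k : Int) 0) := by
            have := PySem.List.map_pyGetD_pyRange_zero matrix ([] : List Int)
            calc (PySem.List.pyRange 0 n 1).map
                  (fun j => PySem.List.pyGetD (PySem.List.pyGetD matrix j []) (k : Int) 0)
                = ((PySem.List.pyRange 0 n 1).map (fun j => PySem.List.pyGetD matrix j [])).map
                    (fun r => PySem.List.pyGetD r (k : Int) 0) := by rw [List.map_map]; rfl
              _ = matrix.map (fun r => PySem.List.pyGetD r (k : Int) 0) := by
                    rw [hn, ← PySem.List.len_eq, this]
          rw [hmap, pvScan_empty]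
          congr 1
          apply List.map_congr_left
          intro r _
          rw [PySem.List.pyGetD_natCast]
        have hrange : PySem.List.pyRange 0 (0 + (matrix.length : Int)) 1
            = (List.range matrix.length).map (fun k : Nat => (k : Int)) := by
          rw [zero_add]
          exact PySem.List.pyRange_zero_nat matrix.length
        rw [hrange, List.foldl_map]
        have hcnt : ∀ (l : List Nat) (a : Int), (∀ k ∈ l, k < matrix.length) →
            l.foldl (fun c (k : Nat) =>
                if pvAColLoop matrix (k : Int) (PySem.List.pyRange 0 n 1) PySem.Set.empty then c + 1 else c) a
              = a + (l.countP (fun k => pvHasDupB (matrix.map (fun r => r.getD k 0))) : Int) := by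
          intro l a hl
          rw [← PySem.List.foldl_count_if (fun k => pvHasDupB (matrix.map (fun r => r.getD k 0))) l a]
          apply PySem.List.foldl_congr_mem
          intro acc k hkmem
          rw [hcol k (hl k hkmem)]
        rw [hcnt (List.range matrix.length) 0 (fun k hk => List.mem_range.mp hk), zero_add]
        have hpos : 0 < n := by omega
        have htop : (if 0 < n then PySem.List.slice matrix none (some n) else []) = matrix := by
          rw [if_pos hpos, PySem.List.slice_to matrix (by omega), hn]
          simp
        rw [htop]
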